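-- pv_equiv track=rewrite | github.com/rajpabari/Python-III | Labs/2.2textFormatting.py | genRow
-- ===== SOURCE A (Python) =====
-- def genRow(start, stop):
--     ans = ""
--     while start <= stop:
--         counter = 0
--         for i in range(start, stop+1, 2):
--             ans += str(i) + " "
--             counter += 2
--         ans = ans[:-1]
--         while (counter <= stop):
--             ans += " "
--             counter += 1
--         start += 2
--         ans += "\n"
--     return ans[:-1]
-- ===== SOURCE B (Python) =====
-- def genRow(start, stop):
--     if start > stop:
--         return ''
--     last = start + 2 * ((stop - start) // 2)
--     rows = []
--     joined = ''
--     count = 0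
--     s = last
--     while s >= start:
--         joined = str(s) + (' ' + joined if joined else '')
--         count += 1
--         rows.append(joined + ' ' * max(0, stop - 2 * count + 1))
--         s -= 2
--     return '\n'.join(reversed(rows))
-- ===== Notes on version B (the rewrite author's own statement) =====
-- stated objective: alternative
-- what changed: Builds the rows back-to-front in a single downward pass: each row's number section is obtained by prepending one number to the previous (shorter) row's section with a shared suffix string, padding is a closed-form space count, and the row list is reversed at the end; A re-scans a fresh range per row, chops the trailing space, and pads one character at a time in a while loop.
import Mathlib
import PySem

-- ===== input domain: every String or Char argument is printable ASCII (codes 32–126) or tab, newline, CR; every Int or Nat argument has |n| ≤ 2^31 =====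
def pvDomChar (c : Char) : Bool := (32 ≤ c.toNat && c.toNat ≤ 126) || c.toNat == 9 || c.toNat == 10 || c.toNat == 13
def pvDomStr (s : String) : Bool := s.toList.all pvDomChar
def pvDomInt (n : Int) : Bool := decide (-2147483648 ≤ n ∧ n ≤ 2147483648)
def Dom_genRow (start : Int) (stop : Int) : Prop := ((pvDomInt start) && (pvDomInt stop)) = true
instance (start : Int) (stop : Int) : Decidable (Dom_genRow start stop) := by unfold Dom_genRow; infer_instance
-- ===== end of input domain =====

-- B builds the rows back-to-front in one downward pass, each row's number section obtained by
-- prepending one number to the previous (shorter) row's section, with a closed-form pad count,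
-- reversing the row list at the end; A re-scans a range per row and pads one character at a time.
-- Proved equal on all inputs.

-- ===== PORT A =====
-- while (counter <= stop): ans += " "; counter += 1
def genRowPad (counter : Int) (stop : Int) (ans : String) : String :=
  if counter ≤ stop then genRowPad (counter + 1) stop (ans ++ " ") else ans
termination_by (stop + 1 - counter).toNat
decreasing_by omega

-- the outer while loop of A; state is (start, ans)
def genRowLoop (start : Int) (stop : Int) (ans : String) : String :=
  if start ≤ stop then
    let st := (PySem.List.pyRange start (stop + 1) 2).foldl
      (fun (p : String × Int) i => (p.1 ++ PySem.Int.toStr i ++ " ", p.2 + 2)) (ans, (0 : Int))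
    genRowLoop (start + 2) stop
      (genRowPad st.2 stop (PySem.Str.slice st.1 none (some (-1))) ++ "\n")
  else ans
termination_by (stop + 1 - start).toNat
decreasing_by omega

def genRow (start : Int) (stop : Int) : String :=
  PySem.Str.slice (genRowLoop start stop "") none (some (-1))

-- ===== PORT B =====
-- the while loop of B: s runs last, last-2, …, start; joined is the shared number section,
-- extended at the front each step; ' ' * max(0, …) ported as a replicate-built string (exact)
def genRowAltLoop (start : Int) (stop : Int) (s : Int) (joined : String) (count : Int)
    (rows : List String) : List String :=
  if s ≥ start then
    let j := PySem.Int.toStr s ++ (if joined = "" then "" else " " ++ joined)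
    genRowAltLoop start stop (s - 2) j (count + 1)
      (rows ++ [j ++ String.ofList (List.replicate (max 0 (stop - 2 * (count + 1) + 1)).toNat ' ')])
  else rows
termination_by (s + 2 - start).toNat
decreasing_by omega

def genRow_alt (start : Int) (stop : Int) : String :=
  if start > stop then "" else
    let last := start + 2 * PySem.Int.floordiv (stop - start) 2
    PySem.Str.join "\n" (genRowAltLoop start stop last "" 0 []).reverse

-- ===== PRECONDITION & SPEC =====
def Spec_genRow (start : Int) (stop : Int) (out : String) : Prop := out = genRow_alt start stop
instance (start : Int) (stop : Int) (out : String) : Decidable (Spec_genRow start stop out) := by unfold Spec_genRow; infer_instance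

-- ===== CLAIM (what is proved, stated in full; the proofs are below) =====
def Claim_equal_genRow : Prop := ∀ (start : Int) (stop : Int), Dom_genRow start stop → Spec_genRow start stop (genRow start stop)

-- ===== LEMMAS AND PROOFS =====

-- the character content of one row, for the suffix l of the number sequence
def rowCh (stop : Int) (l : List Int) : List Char :=
  PySem.Chars.join [' '] (l.map PySem.Int.toChars) ++
    List.replicate (stop - 2 * (l.length : Int) + 1).toNat ' '

-- the rows for every nonempty suffix of l, front to back
def rowsOf (stop : Int) : List Int → List (List Char)
  | [] => []
  | x :: xs => rowCh stop (x :: xs) :: rowsOf stop xs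

-- rows (as Strings) for every nonempty suffix of l ++ tail that starts inside l, front to back
def suffRowsT (stop : Int) : List Int → List Int → List String
  | [], _ => []
  | x :: xs, tail => String.ofList (rowCh stop (x :: (xs ++ tail))) :: suffRowsT stop xs tail

-- joining with one separator = flatten pieces-with-trailing-separator, then drop the last char
theorem join_eq_dropLast (c : Char) :
    ∀ ps : List (List Char),
      (List.flatten (ps.map (fun p => p ++ [c]))).dropLast = PySem.Chars.join [c] ps := by
  intro ps
  induction ps with
  | nil => simp [PySem.Chars.join_nil]
  | cons p rest ih =>
    cases rest with
    | nil => simp [PySem.Chars.join_singleton]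
    | cons q rs =>
      rw [PySem.Chars.join_cons_cons]
      have hne : (List.flatten (((q :: rs).map (fun p => p ++ [c])))) ≠ [] := by simp
      rw [List.map_cons, List.flatten_cons, List.dropLast_append_of_ne_nil hne, ih]

theorem pyRange_two_nil (a b : Int) (h : b ≤ a) : PySem.List.pyRange a b 2 = [] := by
  rw [PySem.List.pyRange_of_pos a b (by norm_num)]
  simp [show ¬ a < b by omega]

theorem pyRange_two_cons (a b : Int) (h : a < b) :
    PySem.List.pyRange a b 2 = a :: PySem.List.pyRange (a + 2) b 2 := by
  rw [PySem.List.pyRange_of_pos a b (by norm_num),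
      PySem.List.pyRange_of_pos (a + 2) b (by norm_num)]
  have hc : (if a < b then ((b - a + 2 - 1) / 2).toNat else 0)
      = (if a + 2 < b then ((b - (a + 2) + 2 - 1) / 2).toNat else 0) + 1 := by
    split_ifs <;> omega
  rw [hc, List.range_succ_eq_map]
  simp only [List.map_cons, List.map_map, List.cons.injEq]
  refine ⟨by push_cast; ring, ?_⟩
  apply List.map_congr_left
  intro k _
  simp only [Function.comp]
  push_cast
  ring

-- splitting off the LAST element of an even-stepped range
theorem pyRange_two_snoc (a s : Int) (hle : a ≤ s) (hdvd : (2 : Int) ∣ s - a) :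
    PySem.List.pyRange a (s + 1) 2 = PySem.List.pyRange a (s - 1) 2 ++ [s] := by
  rw [PySem.List.pyRange_of_pos a (s + 1) (by norm_num),
      PySem.List.pyRange_of_pos a (s - 1) (by norm_num)]
  have hc : (if a < s + 1 then ((s + 1 - a + 2 - 1) / 2).toNat else 0)
      = (if a < s - 1 then ((s - 1 - a + 2 - 1) / 2).toNat else 0) + 1 := by
    obtain ⟨k, hk⟩ := hdvd
    split_ifs <;> omega
  rw [hc, List.range_succ, List.map_append, List.map_singleton]
  congr 2
  obtain ⟨k, hk⟩ := hdvd
  split_ifs <;> omega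

theorem genRowPad_toList (stop : Int) :
    ∀ (counter : Int) (ans : String),
      (genRowPad counter stop ans).toList
        = ans.toList ++ List.replicate (stop + 1 - counter).toNat ' ' := by
  intro counter ans
  induction counter, ans using genRowPad.induct stop with
  | case1 counter ans h ih =>
    rw [genRowPad, if_pos h, ih]
    have hn : (stop + 1 - counter).toNat = (stop + 1 - (counter + 1)).toNat + 1 := by omega
    rw [hn, List.replicate_succ]
    simp
  | case2 counter ans h =>
    rw [genRowPad, if_neg h]
    have hn : (stop + 1 - counter).toNat = 0 := by omega
    simp [hn]

theorem fold_row (l : List Int) :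
    ∀ (s : String) (c : Int),
      (l.foldl (fun (p : String × Int) i => (p.1 ++ PySem.Int.toStr i ++ " ", p.2 + 2)) (s, c))
        = (String.ofList (s.toList
              ++ List.flatten (l.map (fun i => PySem.Int.toChars i ++ [' ']))),
           c + 2 * l.length) := by
  induction l with
  | nil =>
    intro s c
    simp
  | cons x xs ih =>
    intro s c
    simp only [List.foldl_cons, ih, List.map_cons, List.flatten_cons, List.length_cons,
      Prod.mk.injEq]
    refine ⟨?_, by push_cast; ring⟩
    apply String.ext
    simp [PySem.Int.toList_toStr]

theorem genRowLoop_toList (stop : Int) :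
    ∀ (start : Int) (ans : String),
      (genRowLoop start stop ans).toList
        = ans.toList
          ++ List.flatten ((rowsOf stop (PySem.List.pyRange start (stop + 1) 2)).map
              (fun row => row ++ ['\n'])) := by
  intro start ans
  induction start, ans using genRowLoop.induct stop with
  | case1 start ans h st ih =>
    rw [genRowLoop, if_pos h]
    simp only []
    have hcons := pyRange_two_cons start (stop + 1) (by omega)
    set nums := PySem.List.pyRange start (stop + 1) 2 with hnums
    set flat := List.flatten (nums.map (fun i => PySem.Int.toChars i ++ [' '])) with hflat
    have hflatne : flat ≠ [] := by
      rw [hflat, hcons]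
      simp
    have hst : st = (String.ofList (ans.toList ++ flat), 0 + 2 * (nums.length : Int)) :=
      fold_row nums ans 0
    have hsl : (PySem.Str.slice (String.ofList (ans.toList ++ flat)) none (some (-1))).toList
        = ans.toList ++ flat.dropLast := by
      rw [PySem.Str.slice_to_neg_one]
      simp [List.dropLast_append_of_ne_nil hflatne]
    have hrow : flat.dropLast = PySem.Chars.join [' '] (nums.map PySem.Int.toChars) := by
      rw [hflat, ← join_eq_dropLast]
      simp [List.map_map, Function.comp_def]
    rw [fold_row]
    dsimp only
    rw [hst] at ih
    dsimp only at ih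
    rw [ih]
    have harg : (genRowPad (0 + 2 * ((nums.length : Int))) stop
          (PySem.Str.slice (String.ofList (ans.toList ++ flat)) none (some (-1))) ++ "\n").toList
        = ans.toList ++ rowCh stop nums ++ ['\n'] := by
      rw [String.toList_append, genRowPad_toList, hsl, hrow]
      have hpn : ((stop : Int) + 1 - 2 * (nums.length : Int)).toNat
          = (stop - 2 * (nums.length : Int) + 1).toNat := by omega
      simp [rowCh, hpn, List.append_assoc]
    rw [harg, hcons, rowsOf, ← hcons]
    simp [List.append_assoc]
  | case2 start ans h =>
    rw [genRowLoop, if_neg h, pyRange_two_nil _ _ (by omega)]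
    simp [rowsOf]

theorem toChars_ne_nil (n : Int) : PySem.Int.toChars n ≠ [] := by
  unfold PySem.Int.toChars
  split_ifs
  · simp
  · have := Nat.length_toDigits_pos (b := 10) (n := n.toNat)
    intro h
    rw [h] at this
    simp at this

theorem suffRowsT_snoc (stop : Int) (x : Int) (tail : List Int) :
    ∀ l : List Int,
      suffRowsT stop (l ++ [x]) tail
        = suffRowsT stop l (x :: tail) ++ [String.ofList (rowCh stop (x :: tail))] := by
  intro l
  induction l with
  | nil => simp [suffRowsT]
  | cons y ys ih =>
    rw [List.cons_append, suffRowsT, ih, suffRowsT]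
    simp [List.append_assoc]

theorem genRowAltLoop_spec (start stop : Int) :
    ∀ (s : Int) (joined : String) (count : Int) (rows : List String) (tail : List Int),
      (2 : Int) ∣ s - start →
      joined.toList = PySem.Chars.join [' '] (tail.map PySem.Int.toChars) →
      count = (tail.length : Int) →
      genRowAltLoop start stop s joined count rows
        = rows ++ (suffRowsT stop (PySem.List.pyRange start (s + 1) 2) tail).reverse := by
  intro s joined count rows
  induction s, joined, count, rows using genRowAltLoop.induct start stop with
  | case1 s joined count rows h j ih =>
    intro tail hdvd hj hc
    have hjt : j.toList = PySem.Chars.join [' '] ((s :: tail).map PySem.Int.toChars) := by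
      cases tail with
      | nil =>
        have hje : joined = "" := by
          apply String.ext
          simp [hj, PySem.Chars.join_nil]
        simp [j, hje, PySem.Int.toList_toStr, PySem.Chars.join_singleton]
      | cons t ts =>
        have hjne : joined ≠ "" := by
          intro hje
          rw [hje] at hj
          have hnil : ([] : List Char)
              = PySem.Chars.join [' '] ((t :: ts).map PySem.Int.toChars) := by
            simpa using hj
          cases ts with
          | nil =>
            rw [List.map_cons, List.map_nil, PySem.Chars.join_singleton] at hnil
            exact toChars_ne_nil t hnil.symm
          | cons u us =>
            rw [List.map_cons, List.map_cons, PySem.Chars.join_cons_cons] at hnil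
            have hlen := congrArg List.length hnil
            simp at hlen
        rw [List.map_cons, List.map_cons, PySem.Chars.join_cons_cons]
        simp [j, hjne, PySem.Int.toList_toStr, hj]
    have hrow : j ++ String.ofList (List.replicate (max 0 (stop - 2 * (count + 1) + 1)).toNat ' ')
        = String.ofList (rowCh stop (s :: tail)) := by
      apply String.ext
      rw [String.toList_append, String.toList_ofList, String.toList_ofList, hjt]
      unfold rowCh
      congr 2
      rw [hc]
      have hm : (max 0 (stop - 2 * ((tail.length : Int) + 1) + 1)).toNat
          = (stop - 2 * (((s :: tail).length : Int)) + 1).toNat := by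
        simp only [List.length_cons]
        push_cast
        omega
      rw [hm]
    rw [genRowAltLoop, if_pos h]
    show genRowAltLoop start stop (s - 2) j (count + 1)
        (rows ++ [j ++ String.ofList (List.replicate (max 0 (stop - 2 * (count + 1) + 1)).toNat ' ')])
      = rows ++ (suffRowsT stop (PySem.List.pyRange start (s + 1) 2) tail).reverse
    rw [ih (s :: tail) (by omega) hjt (by rw [hc, List.length_cons]; push_cast; ring)]
    rw [hrow, pyRange_two_snoc start s (by omega) hdvd]
    have h21 : s - 2 + 1 = s - 1 := by ring
    rw [h21, suffRowsT_snoc]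
    simp [List.append_assoc]
  | case2 s joined count rows h =>
    intro tail _ _ _
    rw [genRowAltLoop, if_neg h, pyRange_two_nil _ _ (by omega)]
    simp [suffRowsT]

theorem suffRowsT_nil_toList (stop : Int) :
    ∀ l : List Int, (suffRowsT stop l []).map String.toList = rowsOf stop l := by
  intro l
  induction l with
  | nil => simp [suffRowsT, rowsOf]
  | cons x xs ih => simp [suffRowsT, rowsOf, ih]

theorem alt_toList (start stop : Int) :
    (genRow_alt start stop).toList
      = PySem.Chars.join ['\n'] (rowsOf stop (PySem.List.pyRange start (stop + 1) 2)) := by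
  unfold genRow_alt
  by_cases h : start > stop
  · rw [if_pos h, pyRange_two_nil _ _ (by omega)]
    simp [rowsOf, PySem.Chars.join_nil]
  · rw [if_neg h]
    have hfd : PySem.Int.floordiv (stop - start) 2 = (stop - start) / 2 :=
      PySem.Int.floordiv_eq_ediv_of_pos (by norm_num)
    have hdvd : (2 : Int) ∣ (start + 2 * PySem.Int.floordiv (stop - start) 2) - start :=
      ⟨PySem.Int.floordiv (stop - start) 2, by ring⟩
    have hrange : PySem.List.pyRange start
          ((start + 2 * PySem.Int.floordiv (stop - start) 2) + 1) 2
        = PySem.List.pyRange start (stop + 1) 2 := by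
      rw [hfd, PySem.List.pyRange_of_pos _ _ (by norm_num),
          PySem.List.pyRange_of_pos _ _ (by norm_num)]
      congr 2
      split_ifs <;> omega
    show (PySem.Str.join "\n" (genRowAltLoop start stop
        (start + 2 * PySem.Int.floordiv (stop - start) 2) "" 0 []).reverse).toList = _
    rw [genRowAltLoop_spec start stop _ "" 0 [] [] hdvd
      (by simp [PySem.Chars.join_nil]) (by simp)]
    rw [List.nil_append, List.reverse_reverse, hrange]
    unfold PySem.Str.join
    rw [String.toList_ofList]
    congr 1
    exact suffRowsT_nil_toList stop _

-- ===== VERDICT (by name: the statement is the Claim_ definition above) =====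
theorem genRow_spec : Claim_equal_genRow := by
  intro start stop _
  unfold Spec_genRow
  apply String.ext
  unfold genRow
  rw [PySem.Str.slice_to_neg_one, genRowLoop_toList, alt_toList]
  simp only [String.toList_empty, List.nil_append]
  rw [join_eq_dropLast]
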